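-- pv_equiv track=rewrite | github.com/yg98099328-sketch/Beluca__Pipeline-in-house- | src/nuke_setup_pro.py | _best_enum_match
-- ===== SOURCE A (Python) =====
-- def _best_enum_match(values, required_substrings):
--     """
--     values: knob.values() 형태의 문자열 리스트
--     required_substrings: 매칭에 필요한 키워드들(전부 포함해야 함)
--     """
--     req = [s.lower() for s in required_substrings if s]
--     for v in values:
--         vl = str(v).lower()
--         if all(r in vl for r in req):
--             return v
--     # fallback: 첫 번째에서 부분 키워드만 매칭
--     for v in values:
--         vl = str(v).lower()
--         if any(r in vl for r in req):
--             return v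
--     return None
-- ===== SOURCE B (Python) =====
-- def _best_enum_match(values, required_substrings):
--     req = [s.lower() for s in required_substrings if s]
--
--     def score(v, lo):
--         # score of v: 2 = contains every keyword, 1 = some but not all, 0 = none.
--         # Pruning bound: a value scoring <= lo cannot beat the incumbent, so it
--         # may be reported as lo without computing the expensive 0/1 distinction.
--         vl = str(v).lower()
--         if all(r in vl for r in req):
--             return 2
--         if lo >= 1:
--             return lo
--         return 1 if any(r in vl for r in req) else 0
--
--     best, best_s = None, 0
--     for v in values:
--         s = score(v, best_s)
--         if best_s < s:
--             best, best_s = v, s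
--         if best_s == 2:
--             break
--     return best
-- ===== Notes on version B (the rewrite author's own statement) =====
-- stated objective: alternative
-- what changed: Replaces A's two staged scans (first all-match, then first any-match) by a scoring selection: each value gets a score (2 = contains all keywords, 1 = some, 0 = none; computed with a pruning lower bound so values that cannot beat the incumbent are not fully scored) and one strictly-improving loop keeps the first value of maximal positive score, breaking at the top score.
import Mathlib
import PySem

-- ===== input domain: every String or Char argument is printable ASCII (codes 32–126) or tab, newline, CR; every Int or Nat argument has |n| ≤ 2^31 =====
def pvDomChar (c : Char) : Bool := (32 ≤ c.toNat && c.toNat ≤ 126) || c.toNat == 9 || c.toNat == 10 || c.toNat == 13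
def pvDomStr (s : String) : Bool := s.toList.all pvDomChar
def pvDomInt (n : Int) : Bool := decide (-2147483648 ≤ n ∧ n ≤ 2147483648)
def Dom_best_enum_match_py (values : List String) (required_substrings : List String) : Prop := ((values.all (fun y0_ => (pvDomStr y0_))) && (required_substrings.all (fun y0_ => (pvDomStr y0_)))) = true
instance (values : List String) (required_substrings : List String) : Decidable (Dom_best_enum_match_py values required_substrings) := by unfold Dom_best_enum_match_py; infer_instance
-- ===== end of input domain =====

-- B replaces A's two staged scans by scoring each value (2 = all keywords, 1 = some, 0 = none)
-- and keeping the first value of maximal positive score, breaking at the top score (objective: alternative).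

-- ===== PORT A =====
-- first for-loop: return the first v whose lowercase contains ALL required keywords
def pvScanAll (req : List String) : List String → Option String
  | [] => none
  | v :: rest =>
      let vl := PySem.Str.lower v
      if req.all (fun r => PySem.Str.isIn r vl) then some v else pvScanAll req rest

-- second for-loop: return the first v whose lowercase contains ANY required keyword
def pvScanAny (req : List String) : List String → Option String
  | [] => none
  | v :: rest =>
      let vl := PySem.Str.lower v
      if req.any (fun r => PySem.Str.isIn r vl) then some v else pvScanAny req rest

def best_enum_match_py (values : List String) (required_substrings : List String) : Option String :=
  let req := (required_substrings.filter (fun s => s != "")).map PySem.Str.lower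
  match pvScanAll req values with
  | some v => some v
  | none => pvScanAny req values

-- ===== PORT B =====
-- score(v, lo): 2 = contains every keyword, 1 = some but not all, 0 = none;
-- pruning bound lo: a value scoring <= lo may be reported as lo (it cannot beat the incumbent)
def pvScore (req : List String) (v : String) (lo : Nat) : Nat :=
  let vl := PySem.Str.lower v
  if req.all (fun r => PySem.Str.isIn r vl) then 2
  else if 1 ≤ lo then lo
  else if req.any (fun r => PySem.Str.isIn r vl) then 1 else 0

-- the strictly-improving loop over (best, best_s), breaking once the top score 2 is reached
def pvBestPick (req : List String) : List String → Option String × Nat → Option String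
  | [], st => st.1
  | v :: rest, st =>
      let s := pvScore req v st.2
      let st' := if st.2 < s then (some v, s) else st
      if st'.2 = 2 then st'.1 else pvBestPick req rest st'

def best_enum_match_py_alt (values : List String) (required_substrings : List String) : Option String :=
  let req := (required_substrings.filter (fun s => s != "")).map PySem.Str.lower
  pvBestPick req values (none, 0)

-- ===== PRECONDITION & SPEC =====
def Spec_best_enum_match_py (values : List String) (required_substrings : List String) (out : Option String) : Prop := out = best_enum_match_py_alt values required_substrings
instance (values : List String) (required_substrings : List String) (out : Option String) : Decidable (Spec_best_enum_match_py values required_substrings out) := by unfold Spec_best_enum_match_py; infer_instance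

-- ===== CLAIM (what is proved, stated in full; the proofs are below) =====
def Claim_equal_best_enum_match_py : Prop := ∀ (values : List String) (required_substrings : List String), Dom_best_enum_match_py values required_substrings → Spec_best_enum_match_py values required_substrings (best_enum_match_py values required_substrings)

-- ===== LEMMAS AND PROOFS =====

theorem pvScore_of_all (req : List String) (v : String) (lo : Nat)
    (h : (req.all (fun r => PySem.Str.isIn r (PySem.Str.lower v))) = true) :
    pvScore req v lo = 2 := by
  unfold pvScore; dsimp only; rw [if_pos h]

theorem pvScore0_of_not_all (req : List String) (v : String)
    (h : ¬ (req.all (fun r => PySem.Str.isIn r (PySem.Str.lower v))) = true) :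
    pvScore req v 0 = if (req.any (fun r => PySem.Str.isIn r (PySem.Str.lower v))) = true then 1 else 0 := by
  unfold pvScore; dsimp only
  rw [if_neg h, if_neg (by omega)]

theorem pvScore1_of_not_all (req : List String) (v : String)
    (h : ¬ (req.all (fun r => PySem.Str.isIn r (PySem.Str.lower v))) = true) :
    pvScore req v 1 = 1 := by
  unfold pvScore; dsimp only
  rw [if_neg h, if_pos (by omega)]

-- from a fallback state (some fb, 1): only an all-match can displace fb
theorem pvBestPick_fb (req : List String) (vs : List String) (fb : String) :
    pvBestPick req vs (some fb, 1) = some ((pvScanAll req vs).getD fb) := by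
  induction vs with
  | nil => rfl
  | cons v rest ih =>
      simp only [pvBestPick, pvScanAll]
      by_cases hall : (req.all fun r => PySem.Str.isIn r (PySem.Str.lower v)) = true
      · rw [if_pos hall]
        simp only [pvScore_of_all req v _ hall]
        rw [if_pos (show ((some fb : Option String), (1:Nat)).2 < 2 from Nat.one_lt_two)]
        rfl
      · rw [if_neg hall]
        simp only [pvScore1_of_not_all req v hall]
        rw [if_neg (show ¬ ((some fb : Option String), (1:Nat)).2 < 1 from by
              change ¬ (1:Nat) < 1; omega),
            if_neg (show ¬ ((some fb : Option String), (1:Nat)).2 = 2 from by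
              change ¬ (1:Nat) = 2; omega)]
        exact ih

-- main invariant from the initial state
theorem pvBestPick_main (req : List String) (vs : List String) :
    pvBestPick req vs (none, 0) = (pvScanAll req vs).or (pvScanAny req vs) := by
  induction vs with
  | nil => rfl
  | cons v rest ih =>
      simp only [pvBestPick, pvScanAll, pvScanAny]
      by_cases hall : (req.all fun r => PySem.Str.isIn r (PySem.Str.lower v)) = true
      · rw [if_pos hall]
        simp only [pvScore_of_all req v _ hall]
        rw [if_pos (show ((none : Option String), (0:Nat)).2 < 2 from Nat.zero_lt_two)]
        rfl
      · rw [if_neg hall]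
        simp only [pvScore0_of_not_all req v hall]
        by_cases hany : (req.any fun r => PySem.Str.isIn r (PySem.Str.lower v)) = true
        · rw [if_pos hany, if_pos hany]
          rw [if_pos (show ((none : Option String), (0:Nat)).2 < 1 from Nat.zero_lt_one),
              if_neg (show ¬ ((some v : Option String), (1:Nat)).2 = 2 from by
                change ¬ (1:Nat) = 2; omega)]
          rw [pvBestPick_fb req rest v]
          cases pvScanAll req rest <;> rfl
        · rw [if_neg hany, if_neg hany]
          rw [if_neg (show ¬ ((none : Option String), (0:Nat)).2 < 0 from by omega),
              if_neg (show ¬ ((none : Option String), (0:Nat)).2 = 2 from by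
                change ¬ (0:Nat) = 2; omega)]
          exact ih

-- ===== VERDICT (by name: the statement is the Claim_ definition above) =====
theorem best_enum_match_py_spec : Claim_equal_best_enum_match_py := by
  intro values required_substrings _
  unfold Spec_best_enum_match_py best_enum_match_py best_enum_match_py_alt
  rw [pvBestPick_main]
  cases h : pvScanAll ((required_substrings.filter (fun s => s != "")).map PySem.Str.lower) values <;> simp [h]
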